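-- pv_equiv track=rewrite | github.com/BarraHarrison/Algorithms-Data-Structures | bigO_notation.py | linear_time
-- ===== SOURCE A (Python) =====
-- def linear_time(n):
--     count = 0
--     for _ in range(n):
--         j = 1
--         while j < n:
--             j *= 2
--             count += 1
--     return count
-- ===== SOURCE B (Python) =====
-- def linear_time(n):
--     return 0 if n <= 1 else n * (n - 1).bit_length()
-- ===== Notes on version B (the rewrite author's own statement) =====
-- stated objective: faster
-- what changed: Replaces the n-iteration loop with a nested doubling loop by a closed form: the inner while performs (n-1).bit_length() doublings, so the total is n * (n-1).bit_length() (0 for n <= 1).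
import Mathlib
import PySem

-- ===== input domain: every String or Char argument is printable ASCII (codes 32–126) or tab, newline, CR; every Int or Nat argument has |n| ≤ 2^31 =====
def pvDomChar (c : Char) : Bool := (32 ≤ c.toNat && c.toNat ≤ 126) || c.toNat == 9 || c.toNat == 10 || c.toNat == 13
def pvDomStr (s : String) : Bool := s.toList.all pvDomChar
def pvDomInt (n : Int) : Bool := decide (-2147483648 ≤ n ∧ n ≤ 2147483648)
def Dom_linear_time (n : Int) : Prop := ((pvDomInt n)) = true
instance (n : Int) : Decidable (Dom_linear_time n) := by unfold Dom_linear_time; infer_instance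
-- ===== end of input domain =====

-- B replaces A's n-iteration loop around a doubling inner loop by the closed form
-- n * (n-1).bit_length() (0 for n ≤ 1); measured asymptotically faster.


-- ===== PORT A =====
-- inner 'while j < n: j *= 2; count += 1' loop; the proof argument 1 ≤ j records
-- the invariant (j starts at 1 and doubles) that makes the Python loop terminate
def linearInner (n j count : Int) (hj : 1 ≤ j) : Int :=
  if h : j < n then linearInner n (j * 2) (count + 1) (by omega) else count
termination_by (n - j).toNat
decreasing_by omega

def linear_time (n : Int) : Int :=
  (PySem.List.pyRange 0 n 1).foldl (fun count _ => linearInner n 1 count (by norm_num)) 0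

-- ===== PORT B =====
def linear_time_alt (n : Int) : Int :=
  if n ≤ 1 then 0 else n * (PySem.Int.bitLength (n - 1) : Int)

-- ===== PRECONDITION & SPEC =====
def Spec_linear_time (n : Int) (out : Int) : Prop := out = linear_time_alt n
instance (n : Int) (out : Int) : Decidable (Spec_linear_time n out) := by unfold Spec_linear_time; infer_instance

-- ===== CLAIM (what is proved, stated in full; the proofs are below) =====
def Claim_equal_linear_time : Prop := ∀ (n : Int), Dom_linear_time n → Spec_linear_time n (linear_time n)

-- ===== LEMMAS AND PROOFS =====

-- PySem.Int.bitLengthAux ignores its fuel as long as there is enough of it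
theorem pvAuxFuel : ∀ (f1 f2 n : ℕ), n < f1 → n < f2 →
    PySem.Int.bitLengthAux f1 n = PySem.Int.bitLengthAux f2 n := by
  intro f1
  induction f1 using Nat.strong_induction_on with
  | _ f1 ih =>
    intro f2 n h1 h2
    match f1, f2 with
    | f1 + 1, f2 + 1 =>
      simp only [PySem.Int.bitLengthAux]
      split
      · rfl
      · rw [ih f1 (Nat.lt_succ_self _) f2 (n / 2) (by omega) (by omega)]

theorem pvBitLength_zero : PySem.Int.bitLength 0 = 0 := by decide

theorem pvBitLength_step (m : ℕ) (h : m ≠ 0) :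
    PySem.Int.bitLength (m : Int) = PySem.Int.bitLength ((m / 2 : ℕ) : Int) + 1 := by
  unfold PySem.Int.bitLength
  simp only [Int.natAbs_natCast]
  have hstep : PySem.Int.bitLengthAux (m + 1) m = PySem.Int.bitLengthAux m (m / 2) + 1 := by
    simp only [PySem.Int.bitLengthAux]
    simp [h]
  rw [hstep, pvAuxFuel m (m / 2 + 1) (m / 2) (by omega) (by omega)]

-- the inner while loop adds bit_length((n-1) // j) to count (for 1 ≤ j)
theorem pvInner_eq (n : Int) : ∀ (k : ℕ) (j c : Int) (hj : 1 ≤ j), (n - j).toNat = k →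
    linearInner n j c hj = c + (PySem.Int.bitLength (((n - 1).toNat / j.toNat : ℕ) : Int) : Int) := by
  intro k
  induction k using Nat.strong_induction_on with
  | _ k ih =>
    intro j c hj hk
    unfold linearInner
    split
    · rename_i h
      rw [ih (n - j * 2).toNat (by omega) (j * 2) (c + 1) (by omega) rfl]
      have hj2 : (j * 2).toNat = j.toNat * 2 := by omega
      have hm : (n - 1).toNat / j.toNat ≠ 0 := by
        have : j.toNat ≤ (n - 1).toNat := by omega
        have := Nat.one_le_div_iff (by omega : 0 < j.toNat) |>.mpr this
        omega
      rw [hj2, ← Nat.div_div_eq_div_mul, pvBitLength_step _ hm]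
      push_cast
      ring
    · have : (n - 1).toNat / j.toNat = 0 := by
        apply Nat.div_eq_of_lt
        omega
      rw [this]
      rw [show ((0 : ℕ) : Int) = (0 : Int) from rfl, pvBitLength_zero]
      simp

-- folding a constant-increment step over a list
theorem pvFold_const (n : Int) (S : Int)
    (hS : ∀ c : Int, linearInner n 1 c (by norm_num) = c + S) :
    ∀ (l : List Int) (c : Int),
      l.foldl (fun count _ => linearInner n 1 count (by norm_num)) c = c + l.length * S := by
  intro l
  induction l with
  | nil => simp
  | cons x xs ihl =>
    intro c
    simp only [List.foldl_cons, List.length_cons]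
    rw [hS, ihl]
    push_cast
    ring

theorem pvMain (n : Int) : linear_time n = linear_time_alt n := by
  have hS : ∀ c : Int, linearInner n 1 c (by norm_num) = c +
      (PySem.Int.bitLength (((n - 1).toNat / (1 : Int).toNat : ℕ) : Int) : Int) :=
    fun c => pvInner_eq n _ 1 c (by norm_num) rfl
  unfold linear_time
  rw [pvFold_const n _ hS, PySem.List.length_pyRange_one]
  simp only [Int.toNat_one, Nat.div_one, Int.sub_zero, Int.zero_add]
  unfold linear_time_alt
  split
  · rename_i h
    have : (n - 1).toNat = 0 := by omega
    rw [this, show ((0 : ℕ) : Int) = (0 : Int) from rfl, pvBitLength_zero]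
    simp
  · rename_i h
    have h1 : ((n - 1).toNat : Int) = n - 1 := by omega
    have h2 : (n.toNat : Int) = n := by omega
    rw [h1, h2]

-- ===== VERDICT (by name: the statement is the Claim_ definition above) =====
theorem linear_time_spec : Claim_equal_linear_time := by
  intro n _
  unfold Spec_linear_time
  exact pvMain n
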